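-- pv_equiv track=rewrite | github.com/sharavsambuu/deeprl-rainbow | rainbow.py | reward_segment_mask_from_done_segment
-- ===== SOURCE A (Python) =====
-- def reward_segment_mask_from_done_segment(s):
--     mask = []
--     current = 1
--     for x in s:
--         mask.append(current)
--         if x > 0:
--             current = 0
--     return mask
-- ===== SOURCE B (Python) =====
-- def reward_segment_mask_from_done_segment(s):
--     s = list(s)
--     n = len(s)
--     idx = next((i for i, x in enumerate(s) if x > 0), None)
--     if idx is None:
--         return [1] * n
--     return [1] * (idx + 1) + [0] * (n - idx - 1)
-- ===== Notes on version B (the rewrite author's own statement) =====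
-- stated objective: simpler
-- what changed: Replaces the stateful per-element loop with locating the first strictly-positive index once and concatenating two constant blocks: ones up to and including that index, zeros after it.
import Mathlib
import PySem

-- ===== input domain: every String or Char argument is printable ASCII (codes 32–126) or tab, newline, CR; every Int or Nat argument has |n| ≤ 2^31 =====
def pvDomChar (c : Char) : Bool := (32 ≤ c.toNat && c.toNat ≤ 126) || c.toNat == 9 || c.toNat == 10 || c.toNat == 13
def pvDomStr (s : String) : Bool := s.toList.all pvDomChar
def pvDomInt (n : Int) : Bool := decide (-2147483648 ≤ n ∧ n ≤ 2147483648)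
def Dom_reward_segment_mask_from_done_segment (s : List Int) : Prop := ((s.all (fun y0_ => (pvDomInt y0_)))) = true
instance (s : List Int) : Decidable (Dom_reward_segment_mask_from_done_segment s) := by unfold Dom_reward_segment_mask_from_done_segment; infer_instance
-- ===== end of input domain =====

-- B builds the mask as two constant blocks around the first strictly-positive index instead of A's stateful loop (objective: simpler).

-- ===== PORT A =====
-- A's loop: append `current`, then clear it once a positive element is seen.
def reward_segment_mask_from_done_segment (s : List Int) : List Int :=
  (s.foldl (fun (p : List Int × Int) x =>
      (p.1 ++ [p.2], if x > 0 then 0 else p.2)) ([], 1)).1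

-- ===== PORT B =====
def reward_segment_mask_from_done_segment_alt (s : List Int) : List Int :=
  let n := s.length
  match List.findIdx? (fun x => decide (x > 0)) s with
  | none => List.replicate n 1
  | some i => List.replicate (i + 1) 1 ++ List.replicate (n - i - 1) 0

-- ===== PRECONDITION & SPEC =====
def Spec_reward_segment_mask_from_done_segment (s : List Int) (out : List Int) : Prop := out = reward_segment_mask_from_done_segment_alt s
instance (s : List Int) (out : List Int) : Decidable (Spec_reward_segment_mask_from_done_segment s out) := by unfold Spec_reward_segment_mask_from_done_segment; infer_instance

-- ===== CLAIM (what is proved, stated in full; the proofs are below) =====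
def Claim_equal_reward_segment_mask_from_done_segment : Prop := ∀ (s : List Int), Dom_reward_segment_mask_from_done_segment s → Spec_reward_segment_mask_from_done_segment s (reward_segment_mask_from_done_segment s)

-- ===== LEMMAS AND PROOFS =====

-- once `current = 0`, A's loop only ever appends zeros
theorem pvLoopZero (s : List Int) (acc : List Int) :
    (s.foldl (fun (p : List Int × Int) x =>
        (p.1 ++ [p.2], if x > 0 then 0 else p.2)) (acc, 0)).1
      = acc ++ List.replicate s.length 0 := by
  induction s generalizing acc with
  | nil => simp
  | cons x t ih =>
      simp only [List.foldl_cons, List.length_cons]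
      rw [ite_self, ih]
      simp [List.replicate_succ, List.append_assoc]

-- while `current = 1`, A's loop produces exactly B's two-block mask of the remaining list
theorem pvLoopOne (s : List Int) (acc : List Int) :
    (s.foldl (fun (p : List Int × Int) x =>
        (p.1 ++ [p.2], if x > 0 then 0 else p.2)) (acc, 1)).1
      = acc ++ reward_segment_mask_from_done_segment_alt s := by
  induction s generalizing acc with
  | nil => simp [reward_segment_mask_from_done_segment_alt]
  | cons x t ih =>
      simp only [List.foldl_cons]
      by_cases hx : x > 0
      · rw [if_pos hx, pvLoopZero]
        simp [reward_segment_mask_from_done_segment_alt, List.findIdx?_cons, hx,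
          List.replicate_succ, List.append_assoc]
      · rw [if_neg hx, ih]
        simp only [reward_segment_mask_from_done_segment_alt, List.findIdx?_cons, hx,
          decide_false, List.length_cons]
        cases h : List.findIdx? (fun x => decide (x > 0)) t with
        | none => simp [List.replicate_succ, List.append_assoc]
        | some i =>
            have hi : i < t.length := (List.findIdx?_eq_some_iff_findIdx_eq.mp h).1
            simp only [Option.map_some]
            rw [List.append_assoc]
            congr 1
            simp [List.replicate_succ]

-- ===== VERDICT (by name: the statement is the Claim_ definition above) =====
theorem reward_segment_mask_from_done_segment_spec : Claim_equal_reward_segment_mask_from_done_segment := by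
  intro s _
  unfold Spec_reward_segment_mask_from_done_segment reward_segment_mask_from_done_segment
  simpa using pvLoopOne s []
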